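-- pv_equiv track=rewrite | github.com/MubarekA/C-Text | ctext.py | questions_json
-- ===== SOURCE A (Python) =====
-- def questions_json(list_of_questions):
--     dicc={}
--     new=[]
--     for i in list_of_questions:
--         choices = {'A','B','C','D','E','F'}
--         if i==" " or i== "":
--             pass
--         elif i[0] in choices:
--             dicc[i[0]]=i[1:]
--         elif i[0].isdigit() and not dicc:
--             dicc[i[0]]=i[1:]
--         elif i[0].isdigit() and dicc:
--             new.append(dicc)
--             dicc={}
--             dicc[i[0]]=i[1:]
--         else:
--             pass
--     new.append(dicc)
--     return new
-- ===== SOURCE B (Python) =====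
-- def questions_json(list_of_questions):
--     # pass 1: tokenize lines into (is_digit, key, value) triples
--     tokens = []
--     for line in list_of_questions:
--         if line == " " or line == "":
--             continue
--         head = line[0]
--         if head in "ABCDEF":
--             tokens.append((False, head, line[1:]))
--         elif head.isdigit():
--             tokens.append((True, head, line[1:]))
--     # pass 2: group tokens into dicts, a digit token starts a new group
--     result = []
--     current = {}
--     for is_digit, key, value in tokens:
--         if is_digit and current:
--             result.append(current)
--             current = {}
--         current[key] = value
--     result.append(current)
--     return result
-- ===== Notes on version B (the rewrite author's own statement) =====
-- stated objective: alternative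
-- what changed: Replaced A's single loop with a five-way if/elif chain over a mutable dict by a tokenize pass (filter lines into (is_digit, key, value) triples) followed by a separate grouping pass that starts a new dict on digit tokens.
import Mathlib
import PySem

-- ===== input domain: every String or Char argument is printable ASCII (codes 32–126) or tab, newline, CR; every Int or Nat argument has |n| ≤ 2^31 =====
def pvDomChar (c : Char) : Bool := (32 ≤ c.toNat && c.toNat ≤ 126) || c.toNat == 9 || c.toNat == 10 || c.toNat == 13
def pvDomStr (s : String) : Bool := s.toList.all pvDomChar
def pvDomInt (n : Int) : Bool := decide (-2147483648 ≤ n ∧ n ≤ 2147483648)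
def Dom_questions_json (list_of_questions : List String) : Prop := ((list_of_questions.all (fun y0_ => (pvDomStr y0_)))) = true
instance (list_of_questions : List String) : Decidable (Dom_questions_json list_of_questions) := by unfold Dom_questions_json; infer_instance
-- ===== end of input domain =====

-- B replaces A's single five-branch loop by a tokenize pass followed by a separate
-- grouping pass (alternative decomposition, same cost).

-- ===== PORT A =====
-- one loop body of A: state is (dicc, new)
def qStepA (p : PySem.Dict String String × List (List (String × String))) (i : String) :
    PySem.Dict String String × List (List (String × String)) :=
  if i = " " ∨ i = "" then p
  else
    match i.toList with
    | [] => p  -- unreachable: i ≠ ""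
    | c :: rest =>
      if c ∈ ['A', 'B', 'C', 'D', 'E', 'F'] then
        (p.1.insert (String.ofList [c]) (String.ofList rest), p.2)
      else if PySem.Chars.isdigit c && p.1.items.isEmpty then
        (p.1.insert (String.ofList [c]) (String.ofList rest), p.2)
      else if PySem.Chars.isdigit c && !p.1.items.isEmpty then
        (PySem.Dict.empty.insert (String.ofList [c]) (String.ofList rest), p.2 ++ [p.1.items])
      else p

def questions_json (list_of_questions : List String) : List (List (String × String)) :=
  let p := list_of_questions.foldl qStepA (PySem.Dict.empty, [])
  p.2 ++ [p.1.items]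

-- ===== PORT B =====
-- pass 1: a line becomes (is_digit, key, value), or nothing
def qToken (line : String) : Option (Bool × String × String) :=
  if line = " " ∨ line = "" then none
  else
    match line.toList with
    | [] => none
    | c :: rest =>
      if c ∈ ['A', 'B', 'C', 'D', 'E', 'F'] then some (false, String.ofList [c], String.ofList rest)
      else if PySem.Chars.isdigit c then some (true, String.ofList [c], String.ofList rest)
      else none

-- pass 2: group tokens; state is (result, current)
def qGroupStep (p : List (List (String × String)) × PySem.Dict String String)
    (t : Bool × String × String) :
    List (List (String × String)) × PySem.Dict String String :=
  let p' := if t.1 && !p.2.items.isEmpty then (p.1 ++ [p.2.items], PySem.Dict.empty) else p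
  (p'.1, p'.2.insert t.2.1 t.2.2)

def questions_json_alt (list_of_questions : List String) : List (List (String × String)) :=
  let p := (list_of_questions.filterMap qToken).foldl qGroupStep ([], PySem.Dict.empty)
  p.1 ++ [p.2.items]

-- ===== PRECONDITION & SPEC =====
def Spec_questions_json (list_of_questions : List String) (out : List (List (String × String))) : Prop := out = questions_json_alt list_of_questions
instance (list_of_questions : List String) (out : List (List (String × String))) : Decidable (Spec_questions_json list_of_questions out) := by unfold Spec_questions_json; infer_instance

-- ===== CLAIM (what is proved, stated in full; the proofs are below) =====
def Claim_equal_questions_json : Prop := ∀ (list_of_questions : List String), Dom_questions_json list_of_questions → Spec_questions_json list_of_questions (questions_json list_of_questions)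

-- ===== LEMMAS AND PROOFS =====
theorem qLoop_eq (xs : List String) (d : PySem.Dict String String)
    (new : List (List (String × String))) :
    xs.foldl qStepA (d, new) =
      (((xs.filterMap qToken).foldl qGroupStep (new, d)).2,
       ((xs.filterMap qToken).foldl qGroupStep (new, d)).1) := by
  induction xs generalizing d new with
  | nil => rfl
  | cons i xs ih =>
    simp only [List.foldl_cons, List.filterMap_cons]
    by_cases h1 : i = " " ∨ i = ""
    · simp [qToken, qStepA, h1, ih]
    · cases hc : i.toList with
      | nil => simp [qToken, qStepA, h1, hc, ih]
      | cons c rest =>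
        by_cases h2 : c ∈ ['A', 'B', 'C', 'D', 'E', 'F']
        · simp [qToken, qStepA, qGroupStep, h1, hc, h2, ih]
        · by_cases h3 : PySem.Chars.isdigit c = true
          · by_cases h4 : d.items.isEmpty = true <;>
              simp [qToken, qStepA, qGroupStep, h1, hc, h2, h3, h4, ih]
          · simp [qToken, qStepA, h1, hc, h2, h3, ih]

-- ===== VERDICT (by name: the statement is the Claim_ definition above) =====
theorem questions_json_spec : Claim_equal_questions_json := by
  intro xs _
  show _ = _
  simp [questions_json, questions_json_alt, qLoop_eq]
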